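-- pv_equiv track=rewrite | github.com/FediTrabelsi/Job_Scrapper_Tanitjobs | scrapper.py | matchRequirements
-- ===== SOURCE A (Python) =====
-- my_pref=["Spring","JAVA","boot"]
--
-- def matchRequirements(job_req):
--     for jReq in job_req:
--         if jReq.lower().find('stage')!=-1 or jReq.lower().find('stagiaire')!=-1:
--             return False
--     for mReq in my_pref:
--         for jReq in job_req:
--             if jReq.lower().find(mReq.lower())!=-1:
--                 return True
--     return False
-- ===== SOURCE B (Python) =====
-- my_pref=["Spring","JAVA","boot"]
--
-- def matchRequirements(job_req):
--     # Single pass: disqualify immediately on a stage keyword, otherwise record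
--     # whether any lowercased preference matched; decide at the end.
--     prefs = [p.lower() for p in my_pref]
--     found = False
--     for jReq in job_req:
--         low = jReq.lower()
--         if 'stage' in low or 'stagiaire' in low:
--             return False
--         if not found and any(p in low for p in prefs):
--             found = True
--     return found
-- ===== Notes on version B (the rewrite author's own statement) =====
-- stated objective: simpler
-- what changed: One single pass over job_req with an accumulated match flag replaces A's separate disqualifier scan plus nested preference-by-preference rescans of the whole list.
import Mathlib
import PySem

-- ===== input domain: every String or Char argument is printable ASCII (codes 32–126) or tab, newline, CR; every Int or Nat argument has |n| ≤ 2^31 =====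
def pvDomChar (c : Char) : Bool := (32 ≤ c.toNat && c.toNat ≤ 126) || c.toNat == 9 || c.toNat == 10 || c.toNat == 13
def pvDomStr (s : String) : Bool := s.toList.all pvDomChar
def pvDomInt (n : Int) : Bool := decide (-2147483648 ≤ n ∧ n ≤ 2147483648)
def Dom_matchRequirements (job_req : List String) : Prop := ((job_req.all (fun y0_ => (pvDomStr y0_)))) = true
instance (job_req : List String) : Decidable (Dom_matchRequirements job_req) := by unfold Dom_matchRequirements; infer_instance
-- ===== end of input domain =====

-- ===== PORT A =====
-- header: B merges A's disqualifier scan and nested preference scans into one pass with a match flag (simpler; same result).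
def my_pref : List String := ["Spring", "JAVA", "boot"]

-- first loop of A: early-return False when a requirement mentions stage/stagiaire
def pvAStage : List String → Bool
  | [] => false
  | j :: rest =>
    if PySem.Str.find (PySem.Str.lower j) "stage" ≠ -1 ∨ PySem.Str.find (PySem.Str.lower j) "stagiaire" ≠ -1 then
      true
    else pvAStage rest

-- inner loop of A's second part
def pvAInner (mReq : String) : List String → Bool
  | [] => false
  | j :: rest =>
    if PySem.Str.find (PySem.Str.lower j) (PySem.Str.lower mReq) ≠ -1 then true
    else pvAInner mReq rest

-- outer loop of A's second part
def pvAOuter (job_req : List String) : List String → Bool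
  | [] => false
  | m :: rest => if pvAInner m job_req then true else pvAOuter job_req rest

def matchRequirements (job_req : List String) : Bool :=
  if pvAStage job_req then false else pvAOuter job_req my_pref

-- ===== PORT B =====
-- the single loop of B, carrying the found flag
def pvBLoop (prefs : List String) (found : Bool) : List String → Bool
  | [] => found
  | j :: rest =>
    let low := PySem.Str.lower j
    if PySem.Str.isIn "stage" low || PySem.Str.isIn "stagiaire" low then false
    else if !found && prefs.any (fun p => PySem.Str.isIn p low) then pvBLoop prefs true rest
    else pvBLoop prefs found rest

def matchRequirements_alt (job_req : List String) : Bool :=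
  pvBLoop (my_pref.map PySem.Str.lower) false job_req

-- ===== PRECONDITION & SPEC =====
def Spec_matchRequirements (job_req : List String) (out : Bool) : Prop := out = matchRequirements_alt job_req
instance (job_req : List String) (out : Bool) : Decidable (Spec_matchRequirements job_req out) := by unfold Spec_matchRequirements; infer_instance

-- ===== CLAIM (what is proved, stated in full; the proofs are below) =====
def Claim_equal_matchRequirements : Prop := ∀ (job_req : List String), Dom_matchRequirements job_req → Spec_matchRequirements job_req (matchRequirements job_req)

-- ===== LEMMAS AND PROOFS =====

-- per-element conditions agree: find ≠ -1 on strings is substring containment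
theorem pv_cond_eq (sub s : List Char) :
    (!decide (PySem.Chars.find s sub = -1)) = PySem.Chars.isIn sub s := by
  rw [Bool.eq_iff_iff]
  simp [PySem.Chars.find_ne_neg_one_iff, PySem.Chars.isIn_iff_infix]

theorem pvAStage_eq (jr : List String) :
    pvAStage jr = jr.any (fun j =>
      PySem.Str.isIn "stage" (PySem.Str.lower j) || PySem.Str.isIn "stagiaire" (PySem.Str.lower j)) := by
  induction jr with
  | nil => rfl
  | cons j rest ih =>
    simp only [pvAStage, List.any_cons, ih]
    by_cases hs : PySem.Str.isIn "stage" (PySem.Str.lower j) = true <;>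
      by_cases hg : PySem.Str.isIn "stagiaire" (PySem.Str.lower j) = true <;>
        simp [pv_cond_eq, hs, hg]

theorem pvAInner_eq (m : String) (jr : List String) :
    pvAInner m jr = jr.any (fun j => PySem.Str.isIn (PySem.Str.lower m) (PySem.Str.lower j)) := by
  induction jr with
  | nil => rfl
  | cons j rest ih =>
    simp only [pvAInner, List.any_cons, ih]
    by_cases h : PySem.Str.isIn (PySem.Str.lower m) (PySem.Str.lower j) = true <;>
      simp [pv_cond_eq, h]

theorem pvAOuter_eq (jr prefs : List String) :
    pvAOuter jr prefs = prefs.any (fun m => pvAInner m jr) := by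
  induction prefs with
  | nil => rfl
  | cons m rest ih =>
    simp only [pvAOuter, List.any_cons]
    by_cases h : pvAInner m jr <;> simp [h, ih]

-- A's preference part as a job-major scan (order of the two existential scans commutes)
theorem pvAOuter_swap (jr : List String) :
    pvAOuter jr my_pref = jr.any (fun j => my_pref.any (fun m =>
      PySem.Str.isIn (PySem.Str.lower m) (PySem.Str.lower j))) := by
  rw [pvAOuter_eq]
  simp only [pvAInner_eq]
  rw [Bool.eq_iff_iff]
  simp only [List.any_eq_true]
  tauto

-- loop invariant for B's single pass
theorem pvBLoop_spec (prefs : List String) (jr : List String) (found : Bool) :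
    pvBLoop prefs found jr =
      if jr.any (fun j => PySem.Str.isIn "stage" (PySem.Str.lower j) || PySem.Str.isIn "stagiaire" (PySem.Str.lower j)) then false
      else (found || jr.any (fun j => prefs.any (fun p => PySem.Str.isIn p (PySem.Str.lower j)))) := by
  induction jr generalizing found with
  | nil => simp [pvBLoop]
  | cons j rest ih =>
    simp only [pvBLoop, List.any_cons]
    cases hs : (PySem.Str.isIn "stage" (PySem.Str.lower j) || PySem.Str.isIn "stagiaire" (PySem.Str.lower j)) with
    | true => simp
    | false =>
      cases hf : found with
      | true => simp [ih]
      | false =>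
        cases hp : prefs.any (fun p => PySem.Str.isIn p (PySem.Str.lower j)) with
        | true => simp [ih]
        | false => simp [ih]

-- ===== VERDICT (by name: the statement is the Claim_ definition above) =====
theorem matchRequirements_spec : Claim_equal_matchRequirements := by
  intro jr _
  unfold Spec_matchRequirements matchRequirements matchRequirements_alt
  rw [pvBLoop_spec, pvAStage_eq, pvAOuter_swap]
  simp only [Bool.false_or]
  congr 1
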